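-- pv_equiv track=rewrite | github.com/MasayaTahara/securityhub-findings-summary | src/count.py | count_compliance_status
-- ===== SOURCE A (Python) =====
-- def count_compliance_status(findings):
--     count_failed = 0
--     count_passed = 0
--     for f in findings:
--         compliance = f.get('Compliance')
--         if compliance != None:
--             compliance_status = compliance.get('Status')
--             if compliance_status == 'FAILED':
--                 count_failed += 1
--             elif compliance_status == 'PASSED':
--                 count_passed += 1
--     return [count_failed, count_passed]
-- ===== SOURCE B (Python) =====
-- def count_compliance_status(findings):
--     count_failed = sum(
--         1 for f in findings
--         if f.get('Compliance') is not None
--         and f.get('Compliance').get('Status') == 'FAILED')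
--     count_passed = sum(
--         1 for f in findings
--         if f.get('Compliance') is not None
--         and f.get('Compliance').get('Status') == 'PASSED')
--     return [count_failed, count_passed]
-- ===== Notes on version B (the rewrite author's own statement) =====
-- stated objective: idiomatic
-- what changed: Replaces the single accumulating loop over two counters by two independent filtered passes (sum over a generator per status).
import Mathlib
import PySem

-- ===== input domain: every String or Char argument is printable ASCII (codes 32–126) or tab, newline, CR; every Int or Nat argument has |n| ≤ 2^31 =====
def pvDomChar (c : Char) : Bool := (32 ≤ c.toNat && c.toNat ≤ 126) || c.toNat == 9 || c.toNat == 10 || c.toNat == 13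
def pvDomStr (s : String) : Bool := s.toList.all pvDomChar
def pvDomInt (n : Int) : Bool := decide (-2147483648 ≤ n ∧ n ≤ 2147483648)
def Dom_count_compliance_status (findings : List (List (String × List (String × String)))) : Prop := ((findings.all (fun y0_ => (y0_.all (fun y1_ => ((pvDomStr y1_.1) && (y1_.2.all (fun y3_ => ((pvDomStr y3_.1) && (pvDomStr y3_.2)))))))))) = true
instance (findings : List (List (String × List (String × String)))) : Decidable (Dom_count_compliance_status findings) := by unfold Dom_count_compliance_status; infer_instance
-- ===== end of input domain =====

-- ===== PORT A =====
-- B replaces A's single two-counter loop by two independent filtered passes; same values.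
def count_compliance_status (findings : List (List (String × List (String × String)))) : List Int :=
  let st := findings.foldl (fun (st : Int × Int) f =>
    match (PySem.Dict.mk f).get? "Compliance" with
    | none => st
    | some compliance =>
      match (PySem.Dict.mk compliance).get? "Status" with
      | some "FAILED" => (st.1 + 1, st.2)
      | some "PASSED" => (st.1, st.2 + 1)
      | _ => st) (0, 0)
  [st.1, st.2]

-- ===== PORT B =====
def pvStatusIs (f : List (String × List (String × String))) (v : String) : Bool :=
  match (PySem.Dict.mk f).get? "Compliance" with
  | none => false
  | some c => (PySem.Dict.mk c).get? "Status" == some v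

def count_compliance_status_alt (findings : List (List (String × List (String × String)))) : List Int :=
  let count_failed : Int := ((findings.filter (fun f => pvStatusIs f "FAILED")).map (fun _ => (1 : Int))).sum
  let count_passed : Int := ((findings.filter (fun f => pvStatusIs f "PASSED")).map (fun _ => (1 : Int))).sum
  [count_failed, count_passed]

-- ===== PRECONDITION & SPEC =====
def Spec_count_compliance_status (findings : List (List (String × List (String × String)))) (out : List Int) : Prop := out = count_compliance_status_alt findings
instance (findings : List (List (String × List (String × String)))) (out : List Int) : Decidable (Spec_count_compliance_status findings out) := by unfold Spec_count_compliance_status; infer_instance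

-- ===== CLAIM (what is proved, stated in full; the proofs are below) =====
def Claim_equal_count_compliance_status : Prop := ∀ (findings : List (List (String × List (String × String)))), Dom_count_compliance_status findings → Spec_count_compliance_status findings (count_compliance_status findings)

-- ===== LEMMAS AND PROOFS =====

-- ===== VERDICT (by name: the statement is the Claim_ definition above) =====
theorem pv_sum_ones (l : List α) (p : α → Bool) :
    ((l.filter p).map (fun _ => (1 : Int))).sum = ((l.filter p).length : Int) := by
  induction l with
  | nil => simp
  | cons a t ih => by_cases h : p a <;> simp [h, ih] <;> ring

theorem pv_foldl (findings : List (List (String × List (String × String)))) (a b : Int) :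
    findings.foldl (fun (st : Int × Int) f =>
      match (PySem.Dict.mk f).get? "Compliance" with
      | none => st
      | some compliance =>
        match (PySem.Dict.mk compliance).get? "Status" with
        | some "FAILED" => (st.1 + 1, st.2)
        | some "PASSED" => (st.1, st.2 + 1)
        | _ => st) (a, b)
    = (a + ((findings.filter (fun f => pvStatusIs f "FAILED")).length : Int),
       b + ((findings.filter (fun f => pvStatusIs f "PASSED")).length : Int)) := by
  induction findings generalizing a b with
  | nil => simp
  | cons f t ih =>
    simp only [List.foldl_cons, List.filter_cons]
    rcases hc : (PySem.Dict.mk f).get? "Compliance" with _ | c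
    · simp [ih, pvStatusIs, hc]
    · rcases hs : (PySem.Dict.mk c).get? "Status" with _ | s
      · simp [ih, pvStatusIs, hc, hs]
      · by_cases hF : s = "FAILED"
        · subst hF; simp [ih, pvStatusIs, hc, hs]; omega
        · by_cases hP : s = "PASSED"
          · subst hP; simp [ih, pvStatusIs, hc, hs]; omega
          · have h1 : ((PySem.Dict.mk c).get? "Status" == some "FAILED") = false := by
              simp [hs, hF]
            have h2 : ((PySem.Dict.mk c).get? "Status" == some "PASSED") = false := by
              simp [hs, hP]
            simp only [hs]
            rw [show (match some s with
              | some "FAILED" => ((a : Int) + 1, (b : Int))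
              | some "PASSED" => (a, b + 1)
              | _ => ((a : Int), (b : Int))) = (a, b) from by
                split <;> simp_all]
            simp [ih, pvStatusIs, hc, h1, h2]

theorem count_compliance_status_spec : Claim_equal_count_compliance_status := by
  intro findings _
  unfold Spec_count_compliance_status count_compliance_status count_compliance_status_alt
  simp [pv_foldl, pv_sum_ones]
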